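-- pv_equiv track=rewrite | github.com/Aarawa1/Python | Dominanta.py | getDominanta
-- ===== SOURCE A (Python) =====
-- def getDominanta(allCharactersList):
--   frequencies = [tup[1] for tup in allCharactersList]
--   max_frequency = max(frequencies)
--
--   count_max_frequency = frequencies.count(max_frequency)
--   if count_max_frequency > 1:
--     return "Nie ma dominanty"
--
--   dominant_char = max(allCharactersList, key=lambda x: x[1])  # key - czyli jaka wartosc bedzie sprawdzana
--   return f"Dominante: {dominant_char[0]} mit {dominant_char[1]} Vorkommen"
-- ===== SOURCE B (Python) =====
-- def getDominanta(allCharactersList):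
--   order = sorted(allCharactersList, key=lambda x: x[1], reverse=True)
--   if len(order) >= 2 and order[0][1] == order[1][1]:
--     return "Nie ma dominanty"
--   top = order[0]
--   return f"Dominante: {top[0]} mit {top[1]} Vorkommen"
-- ===== Notes on version B (the rewrite author's own statement) =====
-- stated objective: alternative
-- what changed: Replaces A's three linear scans (max of frequencies, count of the max, max with key) by one stable descending sort followed by a constant-size inspection of the top two elements.
import Mathlib
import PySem

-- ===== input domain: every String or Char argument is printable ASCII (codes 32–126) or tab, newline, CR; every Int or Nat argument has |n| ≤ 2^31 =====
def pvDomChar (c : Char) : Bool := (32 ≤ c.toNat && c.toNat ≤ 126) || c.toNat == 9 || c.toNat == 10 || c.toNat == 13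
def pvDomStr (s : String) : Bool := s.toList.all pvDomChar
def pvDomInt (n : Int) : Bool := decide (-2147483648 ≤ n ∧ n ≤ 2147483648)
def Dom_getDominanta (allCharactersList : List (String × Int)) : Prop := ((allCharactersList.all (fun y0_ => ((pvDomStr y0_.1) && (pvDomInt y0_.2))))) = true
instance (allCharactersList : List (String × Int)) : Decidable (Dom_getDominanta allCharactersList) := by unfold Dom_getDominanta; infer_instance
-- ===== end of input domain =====

-- B replaces A's three linear scans by one descending sort plus a look at the top two
-- elements (objective: alternative algorithm of similar cost).


-- ===== PORT A =====
def getDominanta (allCharactersList : List (String × Int)) : String :=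
  let frequencies := allCharactersList.map (fun tup => tup.2)
  match PySem.List.max? frequencies (fun x => x) with
  | none => ""   -- max([]) raises ValueError in Python; excluded by Pre_
  | some maxFrequency =>
    let countMaxFrequency := PySem.List.count frequencies maxFrequency
    if countMaxFrequency > 1 then "Nie ma dominanty"
    else
      match PySem.List.max? allCharactersList (fun x => x.2) with
      | none => ""   -- unreachable: the list is nonempty here
      | some dominantChar =>
        "Dominante: " ++ dominantChar.1 ++ " mit " ++ PySem.Int.toStr dominantChar.2 ++ " Vorkommen"

-- ===== PORT B =====
def getDominanta_alt (allCharactersList : List (String × Int)) : String :=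
  let order := PySem.List.sorted allCharactersList (fun x => x.2) true
  match order with
  | [] => ""   -- order[0] raises IndexError in Python; excluded by Pre_
  | top :: rest =>
    if (match rest with | [] => false | second :: _ => decide (top.2 = second.2)) then
      "Nie ma dominanty"
    else
      "Dominante: " ++ top.1 ++ " mit " ++ PySem.Int.toStr top.2 ++ " Vorkommen"

-- ===== PRECONDITION & SPEC =====
-- A raises ValueError (max of an empty sequence) on the empty list; Pre_ excludes exactly that.
def Pre_getDominanta (allCharactersList : List (String × Int)) : Prop := allCharactersList ≠ []
instance (allCharactersList : List (String × Int)) : Decidable (Pre_getDominanta allCharactersList) := by unfold Pre_getDominanta; infer_instance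
def pvWitness_getDominanta : (List (String × Int)) := [("a", 2), ("b", 1)]
def Spec_getDominanta (allCharactersList : List (String × Int)) (out : String) : Prop := out = getDominanta_alt allCharactersList
instance (allCharactersList : List (String × Int)) (out : String) : Decidable (Spec_getDominanta allCharactersList out) := by unfold Spec_getDominanta; infer_instance

-- ===== CLAIM (what is proved, stated in full; the proofs are below) =====
def Claim_equal_getDominanta : Prop := ∀ (allCharactersList : List (String × Int)), Dom_getDominanta allCharactersList → Pre_getDominanta allCharactersList → Spec_getDominanta allCharactersList (getDominanta allCharactersList)

-- ===== LEMMAS AND PROOFS =====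
theorem getDominanta_eq_alt (l : List (String × Int)) (hpre : l ≠ []) :
    getDominanta l = getDominanta_alt l := by
  -- the maximal frequency M
  obtain ⟨M, hM⟩ : ∃ M, PySem.List.max? (l.map (fun tup => tup.2)) (fun x => x) = some M := by
    cases h : PySem.List.max? (l.map (fun tup => tup.2)) (fun x => x) with
    | none => exact absurd (by simpa using (PySem.List.max?_eq_none_iff _ _).mp h) hpre
    | some M => exact ⟨M, rfl⟩
  have hMmem : M ∈ l.map (fun tup => tup.2) := PySem.List.max?_mem hM
  have hMmax : ∀ y ∈ l.map (fun tup => tup.2), y ≤ M := by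
    intro y hy; simpa using PySem.List.max?_isMax hM y hy
  -- the sorted list and its head
  obtain ⟨m, t, hsrt⟩ : ∃ m t, PySem.List.sorted l (fun x => x.2) true = m :: t := by
    cases h : PySem.List.sorted l (fun x => x.2) true with
    | nil => exact absurd ((PySem.List.sorted_eq_nil_iff _ _ _).mp h) hpre
    | cons m t => exact ⟨m, t, rfl⟩
  have hml : m ∈ l := (PySem.List.mem_sorted _ _ _ _).mp (hsrt ▸ List.mem_cons_self)
  have hmge : ∀ y ∈ l, y.2 ≤ m.2 := PySem.List.key_head_sorted_rev_ge l _ hsrt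
  have hmM : m.2 = M := by
    have h1 : m.2 ≤ M := hMmax _ (List.mem_map_of_mem hml)
    obtain ⟨x, hx, hx2⟩ := List.mem_map.mp hMmem
    exact le_antisymm h1 (hx2 ▸ hmge x hx)
  -- the count as countP on l, transported to the sorted list
  have hcnt : PySem.List.count (l.map (fun tup => tup.2)) M
      = List.countP (fun x => x.2 == M) l := by
    rw [PySem.List.count_eq, List.count_eq_countP, List.countP_map]
    rfl
  have hcnt_srt : List.countP (fun x => x.2 == M) l
      = List.countP (fun x => x.2 == M) (m :: t) := by
    have := (PySem.List.sorted_perm l (fun x => x.2) true).countP_eq (fun x => x.2 == M)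
    rw [hsrt] at this; exact this.symm
  unfold getDominanta getDominanta_alt
  simp only [hM, hsrt]
  by_cases hc : PySem.List.count (l.map (fun tup => tup.2)) M > 1
  · -- tie: both return the constant
    rw [if_pos hc]
    obtain ⟨s, t', ht⟩ : ∃ s t', t = s :: t' := by
      cases ht : t with
      | nil =>
        exfalso
        rw [hcnt, hcnt_srt, ht] at hc
        simp [hmM] at hc
      | cons s t' => exact ⟨s, t', rfl⟩
    have hsM : s.2 = M := by
      by_contra hne
      have hsl : s ∈ l := (PySem.List.mem_sorted _ _ _ _).mp (by rw [hsrt, ht]; simp)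
      have hslt : s.2 < M := lt_of_le_of_ne (hMmax _ (List.mem_map_of_mem hsl)) hne
      have hpw := PySem.List.sorted_pairwise_rev l (fun x => x.2)
      rw [hsrt, ht] at hpw
      have ht'0 : List.countP (fun x => x.2 == M) t' = 0 := by
        rw [List.countP_eq_zero]
        intro y hy
        have : y.2 ≤ s.2 := (List.pairwise_cons.mp (List.pairwise_cons.mp hpw).2).1 y hy
        simp only [beq_iff_eq]
        omega
      rw [hcnt, hcnt_srt, ht] at hc
      simp [hmM, hne, ht'0] at hc
    rw [ht]
    simp [hmM, hsM]
  · -- unique maximum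
    rw [if_neg hc]
    have hc1 : List.countP (fun x => x.2 == M) l = 1 := by
      have hpos : 0 < List.countP (fun x => x.2 == M) l := by
        apply List.countP_pos_iff.mpr
        obtain ⟨x, hx, hx2⟩ := List.mem_map.mp hMmem
        exact ⟨x, hx, by simp [hx2]⟩
      rw [hcnt] at hc; omega
    -- filter has exactly one element
    obtain ⟨z, hz⟩ : ∃ z, List.filter (fun x => x.2 == M) l = [z] := by
      rw [List.countP_eq_length_filter] at hc1
      exact List.length_eq_one_iff.mp hc1
    have huniq : ∀ x ∈ l, x.2 = M → x = z := by
      intro x hx hx2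
      have : x ∈ List.filter (fun x => x.2 == M) l := List.mem_filter.mpr ⟨hx, by simp [hx2]⟩
      rw [hz] at this; simpa using this
    -- A's max over pairs
    obtain ⟨d, hd⟩ : ∃ d, PySem.List.max? l (fun x => x.2) = some d := by
      cases h : PySem.List.max? l (fun x => x.2) with
      | none => exact absurd ((PySem.List.max?_eq_none_iff _ _).mp h) hpre
      | some d => exact ⟨d, rfl⟩
    have hdl : d ∈ l := PySem.List.max?_mem hd
    have hdM : d.2 = M := by
      have h1 : d.2 ≤ M := hMmax _ (List.mem_map_of_mem hdl)
      obtain ⟨x, hx, hx2⟩ := List.mem_map.mp hMmem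
      exact le_antisymm h1 (hx2 ▸ PySem.List.max?_isMax hd x hx)
    have hdm : d = m := (huniq d hdl hdM).trans (huniq m hml hmM).symm
    rw [hd]
    cases ht : t with
    | nil => simp [hdm]
    | cons s t' =>
      have hsne : ¬ (m.2 = s.2) := by
        intro heq
        have hsM : s.2 = M := heq ▸ hmM
        rw [ht] at hcnt_srt
        have h2 : List.countP (fun x => x.2 == M) (m :: s :: t')
            = List.countP (fun x => x.2 == M) t' + 2 := by
          simp [hmM, hsM]
        omega
      simp [hdm, hsne]

-- ===== VERDICT (by name: the statement is the Claim_ definition above) =====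
theorem getDominanta_spec : Claim_equal_getDominanta := by
  intro l _hdom hpre
  unfold Spec_getDominanta
  exact getDominanta_eq_alt l hpre
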